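-- pv_equiv track=rewrite | github.com/1610-Fappy/COMP3311-POKEMONDB | helpers.py | split_post
-- ===== SOURCE A (Python) =====
-- def split_tup_vals(tup_list : list):
--     if (len(tup_list) == 0):
--         return tup_list
--     evonum_list = []
--     name_list = []
--     req_list = []
--
--     for t in tup_list:
--         evonum_list.append(t[0])
--         name_list.append(t[2])
--         req_list.append(t[3])
--
--     return evonum_list, name_list, req_list
--
-- def split_post(tup_list : list):
--     if (len(tup_list) == 0):
--         return tup_list
--     evonum_list, name_list, req_list = split_tup_vals(tup_list)
--
--     new_list = []
--     inside_list = []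
--     for i,t in enumerate(tup_list):
--         if (name_list[i] != name_list[i-1] and i != 0):
--             new_list.append(inside_list)
--             inside_list = []
--         elif (name_list[i] == name_list[i-1] or i == 0):
--             inside_list.append(t)
--         if (inside_list == []):
--             inside_list.append(t)
--         if (i == len(tup_list) - 1):
--             new_list.append(inside_list)
--
--     return new_list
-- ===== SOURCE B (Python) =====
-- def split_post(tup_list: list):
--     groups = []
--     rest = tup_list
--     while rest:
--         k = 1
--         while k < len(rest) and rest[k][2] == rest[0][2]:
--             k += 1
--         groups.append(rest[:k])
--         rest = rest[k:]
--     return groups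
-- ===== Notes on version B (the rewrite author's own statement) =====
-- stated objective: simpler
-- what changed: B replaces A's single index loop over a projected name list (with branch flags, negative-index lookback and a last-index flush) by peeling the longest prefix of tuples sharing the head's name field and recursing on the remainder.
import Mathlib
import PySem

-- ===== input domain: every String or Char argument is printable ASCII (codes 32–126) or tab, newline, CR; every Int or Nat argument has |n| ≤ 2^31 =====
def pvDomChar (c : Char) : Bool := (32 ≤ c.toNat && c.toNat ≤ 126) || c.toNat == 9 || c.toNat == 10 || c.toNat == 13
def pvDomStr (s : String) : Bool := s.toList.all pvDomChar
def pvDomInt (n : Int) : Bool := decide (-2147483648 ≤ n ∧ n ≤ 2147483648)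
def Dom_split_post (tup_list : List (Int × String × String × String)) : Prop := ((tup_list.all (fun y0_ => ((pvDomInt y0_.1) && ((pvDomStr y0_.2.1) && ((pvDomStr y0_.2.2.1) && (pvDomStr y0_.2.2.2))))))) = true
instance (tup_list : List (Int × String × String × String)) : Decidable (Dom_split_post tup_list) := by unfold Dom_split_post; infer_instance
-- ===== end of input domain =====

-- B groups consecutive tuples with equal name field by peeling matching prefixes (an outer loop
-- with an inner matching scan), instead of A's single index loop over a projected name list with
-- branch flags and a last-index flush. Same cost class; the objective is a simpler decomposition.

-- ===== PORT A =====
-- Python split_tup_vals: builds the three projection lists by appending in one pass.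
-- (Python returns tup_list itself when it is empty — a value outside the triple type;
-- split_post only calls it on nonempty input, so the empty branch here returns ([], [], []).)
def split_tup_vals (tup_list : List (Int × String × String × String)) :
    List Int × List String × List String :=
  if tup_list.length = 0 then ([], [], [])
  else tup_list.foldl
    (fun st t => (st.1 ++ [t.1], st.2.1 ++ [t.2.2.1], st.2.2 ++ [t.2.2.2]))
    ([], [], [])

-- one iteration of A's `for i,t in enumerate(tup_list)` body (nl = name_list, n = len(tup_list));
-- name_list[i] / name_list[i-1] are ported with pyGet? (Python's negative-index rule at i = 0).
def stepA (nl : List String) (n : Nat)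
    (st : List (List (Int × String × String × String)) × List (Int × String × String × String))
    (it : Int × (Int × String × String × String)) :
    List (List (Int × String × String × String)) × List (Int × String × String × String) :=
  let i := it.1
  let t := it.2
  let ni := PySem.List.pyGet? nl i
  let np := PySem.List.pyGet? nl (i - 1)
  let st1 :=
    if ni ≠ np ∧ i ≠ 0 then (st.1 ++ [st.2], ([] : List (Int × String × String × String)))
    else if ni = np ∨ i = 0 then (st.1, st.2 ++ [t])
    else st
  let st2 := if st1.2 = [] then (st1.1, st1.2 ++ [t]) else st1
  if i = (n : Int) - 1 then (st2.1 ++ [st2.2], st2.2) else st2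

def split_post (tup_list : List (Int × String × String × String)) :
    List (List (Int × String × String × String)) :=
  if tup_list.length = 0 then []
  else
    let name_list := (split_tup_vals tup_list).2.1
    ((PySem.List.enumerate tup_list).foldl (stepA name_list tup_list.length) ([], [])).1

-- ===== PORT B =====
-- Source B: peel the longest prefix of `rest` sharing rest[0]'s name field, append it, recurse on the rest.
def split_post_alt (tup_list : List (Int × String × String × String)) :
    List (List (Int × String × String × String)) :=
  match tup_list with
  | [] => []
  | x :: xs =>
    (x :: xs.takeWhile (fun t => t.2.2.1 == x.2.2.1)) ::
      split_post_alt (xs.dropWhile (fun t => t.2.2.1 == x.2.2.1))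
termination_by tup_list.length
decreasing_by
  simp only [List.length_cons]
  exact Nat.lt_succ_of_le (List.length_dropWhile_le _ _)

-- ===== PRECONDITION & SPEC =====
def Spec_split_post (tup_list : List (Int × String × String × String)) (out : List (List (Int × String × String × String))) : Prop := out = split_post_alt tup_list
instance (tup_list : List (Int × String × String × String)) (out : List (List (Int × String × String × String))) : Decidable (Spec_split_post tup_list out) := by unfold Spec_split_post; infer_instance

-- ===== CLAIM (what is proved, stated in full; the proofs are below) =====
def Claim_equal_split_post : Prop := ∀ (tup_list : List (Int × String × String × String)), Dom_split_post tup_list → Spec_split_post tup_list (split_post tup_list)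

-- ===== LEMMAS AND PROOFS =====

-- the name field of a tuple
def nameOf (t : Int × String × String × String) : String := t.2.2.1

-- grouping with an explicit current group `cur` and previous name `p` (common shape of both loops)
def extG (cur : List (Int × String × String × String)) (p : String) :
    List (Int × String × String × String) → List (List (Int × String × String × String))
  | [] => [cur]
  | y :: ys => if nameOf y = p then extG (cur ++ [y]) p ys else cur :: extG [y] (nameOf y) ys

lemma alt_cons_eq (x : Int × String × String × String) (xs : List (Int × String × String × String)) :
    split_post_alt (x :: xs) =
      (x :: xs.takeWhile (fun t => t.2.2.1 == x.2.2.1)) ::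
        split_post_alt (xs.dropWhile (fun t => t.2.2.1 == x.2.2.1)) := by
  rw [split_post_alt.eq_def]

lemma split_tup_vals_names (l : List (Int × String × String × String)) :
    (split_tup_vals l).2.1 = l.map nameOf := by
  have h : ∀ (l : List (Int × String × String × String)) a b c,
      l.foldl (fun st (t : Int × String × String × String) =>
        (st.1 ++ [t.1], st.2.1 ++ [t.2.2.1], st.2.2 ++ [t.2.2.2])) (a, b, c)
      = (a ++ l.map (·.1), b ++ l.map nameOf, c ++ l.map (·.2.2.2)) := by
    intro l
    induction l with
    | nil => simp
    | cons x xs ih => intro a b c; simp [List.foldl_cons, ih, nameOf]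
  unfold split_tup_vals
  cases l with
  | nil => simp
  | cons x xs => simp [h]

lemma names_get? (tup : List (Int × String × String × String)) (i : Nat)
    (t : Int × String × String × String) (h : tup[i]? = some t) :
    PySem.List.pyGet? (tup.map nameOf) (i : Int) = some (nameOf t) := by
  rw [PySem.List.pyGet?_natCast]
  simp [List.getElem?_map, h]

-- B's recursion equals extG
lemma extG_alt : ∀ (xs : List (Int × String × String × String)) cur p,
    extG cur p xs =
      (cur ++ xs.takeWhile (fun t => t.2.2.1 == p)) ::
        split_post_alt (xs.dropWhile (fun t => t.2.2.1 == p)) := by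
  intro xs
  induction xs with
  | nil => intro cur p; simp [extG, split_post_alt]
  | cons y ys ih =>
    intro cur p
    by_cases h : nameOf y = p
    · have hb : (y.2.2.1 == p) = true := by simpa [nameOf] using h
      simp only [extG, if_pos h, ih, List.takeWhile_cons, List.dropWhile_cons, hb]
      simp
    · have hb : (y.2.2.1 == p) = false := by simpa [nameOf] using h
      simp only [extG, if_neg h, ih, List.takeWhile_cons, List.dropWhile_cons, hb, if_false, Bool.false_eq_true]
      rw [alt_cons_eq]
      simp [nameOf]

lemma alt_cons (x : Int × String × String × String) (xs : List (Int × String × String × String)) :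
    split_post_alt (x :: xs) = extG [x] (nameOf x) xs := by
  rw [alt_cons_eq, extG_alt]
  simp [nameOf]

lemma stepA_zero (nl : List String) (n : Nat) (st : _) (t : Int × String × String × String) :
    stepA nl n st (0, t) =
      if (0 : Int) = (n : Int) - 1 then (st.1 ++ [st.2 ++ [t]], st.2 ++ [t])
      else (st.1, st.2 ++ [t]) := by
  simp [stepA]

lemma stepA_pos (nl : List String) (n : Nat) (st : _) (i : Int)
    (t : Int × String × String × String) (a b : String)
    (hni : PySem.List.pyGet? nl i = some a) (hnp : PySem.List.pyGet? nl (i - 1) = some b)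
    (hi : i ≠ 0) :
    stepA nl n st (i, t) =
      if a = b then
        (if i = (n : Int) - 1 then (st.1 ++ [st.2 ++ [t]], st.2 ++ [t]) else (st.1, st.2 ++ [t]))
      else
        (if i = (n : Int) - 1 then (st.1 ++ [st.2] ++ [[t]], [t]) else (st.1 ++ [st.2], [t])) := by
  simp only [stepA, hni, hnp]
  split_ifs with h1 h2 h3 <;> simp_all

-- A's fold from index i ≥ 1, with p the element at index i-1, computes extG
lemma foldA (tup : List (Int × String × String × String)) :
    ∀ (rest : List (Int × String × String × String)) (i : Nat)
      (acc : List (List (Int × String × String × String)))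
      (cur : List (Int × String × String × String)) (p : Int × String × String × String),
      rest ≠ [] → 1 ≤ i → i + rest.length = tup.length → tup.drop i = rest →
      tup[i-1]? = some p →
      (List.foldl (stepA (tup.map nameOf) tup.length) (acc, cur)
          (PySem.List.enumerate rest (i : Int))).1
        = acc ++ extG cur (nameOf p) rest := by
  intro rest
  induction rest with
  | nil => intro i acc cur p hne; exact absurd rfl hne
  | cons hd tl ih =>
    intro i acc cur p _ h1 hlen hdrop hprev
    have htup_i : tup[i]? = some hd := by
      have h0 := List.getElem?_drop (xs := tup) (i := i) (j := 0)
      rw [hdrop] at h0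
      simpa using h0.symm
    have hni : PySem.List.pyGet? (tup.map nameOf) (i : Int) = some (nameOf hd) :=
      names_get? tup i hd htup_i
    have hcast : (i : Int) - 1 = ((i - 1 : Nat) : Int) := by omega
    have hnp : PySem.List.pyGet? (tup.map nameOf) ((i : Int) - 1) = some (nameOf p) := by
      rw [hcast]; exact names_get? tup (i - 1) p hprev
    have hi0 : (i : Int) ≠ 0 := by
      simp only [ne_eq, Int.natCast_eq_zero]; omega
    have henum : PySem.List.enumerate (hd :: tl) (i : Int)
        = ((i : Int), hd) :: PySem.List.enumerate tl ((i : Int) + 1) := rfl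
    rw [henum, List.foldl_cons, stepA_pos _ _ _ _ _ _ _ hni hnp hi0]
    cases tl with
    | nil =>
      have hlast : (i : Int) = (tup.length : Int) - 1 := by
        simp at hlen; omega
      by_cases h : nameOf hd = nameOf p
      · simp [h, hlast, extG]
      · simp [h, hlast, extG]
    | cons t2 ts =>
      have hnotlast : ((i : Int) = (tup.length : Int) - 1) = False := by
        simp only [List.length_cons] at hlen
        simp only [eq_iff_iff, iff_false]
        omega
      have hdrop' : tup.drop (i + 1) = t2 :: ts := by
        have := List.drop_drop (i := 1) (j := i) (l := tup)
        rw [hdrop] at this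
        simpa using this.symm
      have hcast1 : (i : Int) + 1 = ((i + 1 : Nat) : Int) := by omega
      by_cases h : nameOf hd = nameOf p
      · rw [if_pos h, if_neg (by rw [hnotlast]; exact id)]
        rw [hcast1]
        rw [ih (i + 1) acc (cur ++ [hd]) hd (by simp) (by omega)
          (by simp only [List.length_cons] at hlen ⊢; omega) hdrop' (by simpa using htup_i)]
        simp [extG, h]
      · rw [if_neg h, if_neg (by rw [hnotlast]; exact id)]
        rw [hcast1]
        rw [ih (i + 1) (acc ++ [cur]) [hd] hd (by simp) (by omega)
          (by simp only [List.length_cons] at hlen ⊢; omega) hdrop' (by simpa using htup_i)]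
        simp [extG, h]

-- ===== VERDICT (by name: the statement is the Claim_ definition above) =====
theorem split_post_spec : Claim_equal_split_post := by
  intro tup _
  unfold Spec_split_post split_post
  cases tup with
  | nil => simp [split_post_alt]
  | cons x xs =>
    rw [if_neg (by simp : ¬(x :: xs).length = 0), split_tup_vals_names]
    have henum : PySem.List.enumerate (x :: xs) 0
        = ((0 : Int), x) :: PySem.List.enumerate xs 1 := rfl
    rw [henum]
    show (List.foldl (stepA ((x :: xs).map nameOf) (x :: xs).length) ([], [])
        ((0, x) :: PySem.List.enumerate xs 1)).1 = split_post_alt (x :: xs)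
    rw [List.foldl_cons, stepA_zero]
    cases xs with
    | nil => simp [split_post_alt, PySem.List.enumerate]
    | cons y ys =>
      rw [if_neg (by simp only [List.length_cons]; push_cast; omega :
        ¬(0 : Int) = ((x :: y :: ys).length : Int) - 1)]
      have hf := foldA (x :: y :: ys) (y :: ys) 1 [] [x] x (by simp) le_rfl
        (by simp only [List.length_cons]; omega) (by simp) (by simp)
      simp only [Nat.cast_one] at hf
      simp only [alt_cons]
      simpa using hf
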